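-- pv_equiv track=rewrite | github.com/VimWei/SubtitleFormatter | plugins/builtin/sentence_splitter/plugin.py | _is_in_subordinate_clause
-- ===== SOURCE A (Python) =====
-- def _is_in_subordinate_clause(sentence: str, pos: int) -> bool:
--     """检查位置是否在从句中"""
--
--     # 查找最近的从句引导词
--     subordinate_markers = [
--         "which",
--         "that",
--         "who",
--         "whom",
--         "whose",
--         "where",
--         "when",
--         "why",
--         "how",
--     ]
--
--     # 检查位置前是否有从句引导词
--     before_pos = sentence[:pos].lower()
--     for marker in subordinate_markers:
--         marker_pos = before_pos.rfind(marker)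
--         if marker_pos != -1:
--             # 检查从句引导词前是否有逗号
--             before_marker = sentence[:marker_pos]
--             if "," in before_marker:
--                 # 这是一个从句，检查位置是否在从句内部
--                 # 如果位置在从句引导词之后，则认为在从句中
--                 if pos > marker_pos:
--                     return True
--
--     return False
-- ===== SOURCE B (Python) =====
-- def _is_in_subordinate_clause(sentence: str, pos: int) -> bool:
--     """Comma-pivot check: position is in a subordinate clause iff some marker
--     appears after the first comma of the lowered prefix sentence[:pos]."""
--     if pos <= 0:
--         return False
--     before = sentence[:pos].lower()
--     c = before.find(",")
--     if c == -1:
--         return False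
--     tail = before[c + 1:]
--     markers = ("which", "that", "who", "whom", "whose",
--                "where", "when", "why", "how")
--     return any(m in tail for m in markers)
-- ===== Notes on version B (the rewrite author's own statement) =====
-- stated objective: simpler
-- what changed: Replaces the per-marker rfind loop with its comma-before-occurrence recheck by one comma-pivot computation: find the first comma of the lowered prefix once, then test each marker for membership in the tail after that comma.
import Mathlib
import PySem

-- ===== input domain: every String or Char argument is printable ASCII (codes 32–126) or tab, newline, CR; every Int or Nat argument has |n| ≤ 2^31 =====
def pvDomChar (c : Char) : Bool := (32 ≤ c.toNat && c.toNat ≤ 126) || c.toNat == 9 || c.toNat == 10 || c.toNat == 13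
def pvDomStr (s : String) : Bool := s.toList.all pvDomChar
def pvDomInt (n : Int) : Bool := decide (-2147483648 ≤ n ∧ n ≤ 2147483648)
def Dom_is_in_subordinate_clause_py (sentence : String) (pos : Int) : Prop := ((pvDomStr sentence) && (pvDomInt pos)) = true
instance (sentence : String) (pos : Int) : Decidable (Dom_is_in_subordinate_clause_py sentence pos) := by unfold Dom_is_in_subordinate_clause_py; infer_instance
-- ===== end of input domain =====

-- B replaces A's per-marker rfind + comma-before-occurrence recheck by one first-comma pivot
-- followed by a marker-membership test of the tail after that comma (objective: simpler).

-- ===== PORT A =====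
def pvMarkersA : List String :=
  ["which", "that", "who", "whom", "whose", "where", "when", "why", "how"]

-- the 'for marker in subordinate_markers' loop of A (early return True)
def pvLoopA (sentence : String) (pos : Int) (before_pos : String) : List String → Bool
  | [] => false
  | marker :: rest =>
    let marker_pos := PySem.Str.rfind before_pos marker
    if marker_pos ≠ -1 then
      let before_marker := PySem.Str.slice sentence none (some marker_pos)
      if PySem.Str.isIn "," before_marker then
        if pos > marker_pos then true
        else pvLoopA sentence pos before_pos rest
      else pvLoopA sentence pos before_pos rest
    else pvLoopA sentence pos before_pos rest

def is_in_subordinate_clause_py (sentence : String) (pos : Int) : Bool :=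
  let before_pos := PySem.Str.lower (PySem.Str.slice sentence none (some pos))
  pvLoopA sentence pos before_pos pvMarkersA

-- ===== PORT B =====
-- B's marker tuple is the same literal list pvMarkersA
def is_in_subordinate_clause_py_alt (sentence : String) (pos : Int) : Bool :=
  if pos ≤ 0 then false
  else
    let before := PySem.Str.lower (PySem.Str.slice sentence none (some pos))
    let c := PySem.Str.find before ","
    if c = -1 then false
    else
      let tail := PySem.Str.slice before (some (c + 1)) none
      pvMarkersA.any (fun m => PySem.Str.isIn m tail)

-- ===== PRECONDITION & SPEC =====
def Spec_is_in_subordinate_clause_py (sentence : String) (pos : Int) (out : Bool) : Prop := out = is_in_subordinate_clause_py_alt sentence pos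
instance (sentence : String) (pos : Int) (out : Bool) : Decidable (Spec_is_in_subordinate_clause_py sentence pos out) := by unfold Spec_is_in_subordinate_clause_py; infer_instance

-- ===== CLAIM (what is proved, stated in full; the proofs are below) =====
def Claim_equal_is_in_subordinate_clause_py : Prop := ∀ (sentence : String) (pos : Int), Dom_is_in_subordinate_clause_py sentence pos → Spec_is_in_subordinate_clause_py sentence pos (is_in_subordinate_clause_py sentence pos)

-- ===== LEMMAS AND PROOFS =====

-- rfind.go returns, if not -1, a start position ≤ k of an occurrence of sub
theorem pv_rfind_go_mem (s sub : List Char) :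
    ∀ k, PySem.Chars.rfind.go s sub k ≠ -1 →
      0 ≤ PySem.Chars.rfind.go s sub k ∧
      (PySem.Chars.rfind.go s sub k).toNat ≤ k ∧
      sub <+: s.drop (PySem.Chars.rfind.go s sub k).toNat := by
  intro k
  induction k with
  | zero =>
    intro h
    simp only [PySem.Chars.rfind.go] at *
    split_ifs at * with hp
    · simpa using List.isPrefixOf_iff_prefix.mp hp
    · simp at h
  | succ j ih =>
    intro h
    simp only [PySem.Chars.rfind.go] at h ⊢
    split_ifs at h ⊢ with hp
    · refine ⟨by positivity, by simp, ?_⟩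
      simpa using List.isPrefixOf_iff_prefix.mp hp
    · exact ⟨(ih h).1, le_trans (ih h).2.1 (Nat.le_succ j), (ih h).2.2⟩

-- rfind.go dominates every occurrence start ≤ k
theorem pv_rfind_go_ge (s sub : List Char) :
    ∀ k j, j ≤ k → sub <+: s.drop j →
      PySem.Chars.rfind.go s sub k ≠ -1 ∧ (j : Int) ≤ PySem.Chars.rfind.go s sub k := by
  intro k
  induction k with
  | zero =>
    intro j hj hp
    interval_cases j
    simp only [PySem.Chars.rfind.go]
    rw [List.isPrefixOf_iff_prefix.mpr (by simpa using hp)]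
    simp
  | succ n ih =>
    intro j hj hp
    simp only [PySem.Chars.rfind.go]
    split_ifs with h
    · exact ⟨by omega, by exact_mod_cast hj⟩
    · have hj' : j ≤ n := by
        rcases Nat.lt_or_ge j (n + 1) with h' | h'
        · omega
        · exfalso
          have : j = n + 1 := by omega
          subst this
          exact h (List.isPrefixOf_iff_prefix.mpr hp)
      exact ih j hj' hp

theorem pv_rfind_mem {s sub : List Char} (h : PySem.Chars.rfind s sub ≠ -1) :
    0 ≤ PySem.Chars.rfind s sub ∧ (PySem.Chars.rfind s sub).toNat ≤ s.length ∧
      sub <+: s.drop (PySem.Chars.rfind s sub).toNat :=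
  pv_rfind_go_mem s sub s.length h

theorem pv_rfind_ge {s sub : List Char} {j : Nat} (hs : sub ≠ []) (h : sub <+: s.drop j) :
    PySem.Chars.rfind s sub ≠ -1 ∧ (j : Int) ≤ PySem.Chars.rfind s sub := by
  have hlen : sub.length ≤ s.length - j := by simpa using h.length_le
  have hs1 : 1 ≤ sub.length := List.length_pos_iff.mpr hs
  exact pv_rfind_go_ge s sub s.length j (by omega) h

-- lowering a character preserves being a comma
theorem pv_lowerChar_comma (x : Char) : PySem.Chars.lowerChar x = ',' ↔ x = ',' := by
  unfold PySem.Chars.lowerChar PySem.Chars.isupper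
  split_ifs with h
  · simp only [decide_eq_true_eq, Bool.and_eq_true] at h
    constructor
    · intro hc
      exfalso
      have h1 : 65 ≤ x.toNat := h.1
      have h2 : x.toNat ≤ 90 := h.2
      have hv : (Char.ofNat (x.toNat + 32)).toNat = x.toNat + 32 := by
        rw [Char.toNat_ofNat, if_pos (Or.inl (by omega))]
      have hce := congrArg Char.toNat hc
      rw [hv] at hce
      have hcomma : (',' : Char).toNat = 44 := rfl
      omega
    · intro hc; subst hc; simp at h
  · simp

theorem pv_mem_comma_map (l : List Char) :
    ',' ∈ l.map PySem.Chars.lowerChar ↔ ',' ∈ l := by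
  simp only [List.mem_map]
  constructor
  · rintro ⟨x, hx, hl⟩; rwa [(pv_lowerChar_comma x).mp hl] at hx
  · intro hx; exact ⟨',', hx, (pv_lowerChar_comma ',').mpr rfl⟩

-- a comma occurrence before j is a comma in the take-j prefix, and back
theorem pv_comma_mem_take {l : List Char} {k j : Nat} (h : [','] <+: l.drop k) (hkj : k < j) :
    ',' ∈ l.take j := by
  have hk : k < l.length := by
    by_contra hk
    rw [List.drop_eq_nil_of_le (by omega)] at h
    simpa using h.length_le
  rw [List.drop_eq_getElem_cons hk, List.cons_prefix_cons] at h
  exact List.mem_take_iff_getElem.mpr ⟨k, by omega, h.1.symm⟩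

theorem pv_comma_take_exists {l : List Char} {j : Nat} (h : ',' ∈ l.take j) :
    ∃ k, k < j ∧ [','] <+: l.drop k := by
  obtain ⟨k, hk, hv⟩ := List.mem_take_iff_getElem.mp h
  refine ⟨k, by omega, ?_⟩
  rw [List.drop_eq_getElem_cons (by omega), hv]
  exact List.prefix_iff_eq_take.mpr rfl

-- the loop of A is an existential over the marker list
theorem pv_loopA_iff (sentence : String) (pos : Int) (before : String) (ms : List String) :
    pvLoopA sentence pos before ms = true ↔
      ∃ m ∈ ms, PySem.Str.rfind before m ≠ -1 ∧
        PySem.Str.isIn "," (PySem.Str.slice sentence none (some (PySem.Str.rfind before m))) = true ∧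
        pos > PySem.Str.rfind before m := by
  induction ms with
  | nil => simp [pvLoopA]
  | cons m rest ih =>
    simp only [pvLoopA, List.mem_cons, exists_eq_or_imp]
    split_ifs with h1 h2 h3
    · exact iff_of_true rfl (Or.inl ⟨h1, h2, h3⟩)
    · rw [ih]
      exact ⟨fun hh => Or.inr hh, fun hh => hh.resolve_left (fun hc => h3 hc.2.2)⟩
    · rw [ih]
      exact ⟨fun hh => Or.inr hh, fun hh => hh.resolve_left (fun hc => h2 hc.2.1)⟩
    · rw [ih]
      exact ⟨fun hh => Or.inr hh, fun hh => hh.resolve_left (fun hc => h1 hc.1)⟩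

-- the lowered prefix as a list
theorem pv_before_eq (sentence : String) (pos : Int) (hp : 0 ≤ pos) :
    (PySem.Str.lower (PySem.Str.slice sentence none (some pos))).toList =
      (sentence.toList.take pos.toNat).map PySem.Chars.lowerChar := by
  rw [PySem.Str.toList_lower, PySem.Str.toList_slice]
  simp only [PySem.Chars.slice_eq_listSlice]
  rw [PySem.List.slice_to _ hp]
  rfl

-- the two per-marker conditions agree (pos ≥ 1, m a nonempty marker)
theorem pv_marker_iff (sentence : String) (pos : Int) (m : String)
    (hpos : 0 < pos) (hm : m.toList ≠ []) :
    (PySem.Str.rfind (PySem.Str.lower (PySem.Str.slice sentence none (some pos))) m ≠ -1 ∧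
      PySem.Str.isIn ","
        (PySem.Str.slice sentence none
          (some (PySem.Str.rfind (PySem.Str.lower (PySem.Str.slice sentence none (some pos))) m))) = true ∧
      pos > PySem.Str.rfind (PySem.Str.lower (PySem.Str.slice sentence none (some pos))) m) ↔
    (PySem.Str.find (PySem.Str.lower (PySem.Str.slice sentence none (some pos))) "," ≠ -1 ∧
      PySem.Str.isIn m
        (PySem.Str.slice (PySem.Str.lower (PySem.Str.slice sentence none (some pos)))
          (some (PySem.Str.find (PySem.Str.lower (PySem.Str.slice sentence none (some pos))) "," + 1)) none) = true) := by
  have hp0 : (0 : Int) ≤ pos := le_of_lt hpos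
  set sl := sentence.toList with hsl
  set before := (PySem.Str.lower (PySem.Str.slice sentence none (some pos))).toList with hb
  have hbm : before = (sl.take pos.toNat).map PySem.Chars.lowerChar := pv_before_eq sentence pos hp0
  have hnb : before.length ≤ pos.toNat := by
    rw [hbm]; simp
  have hcomma_take : ∀ j : Nat, j ≤ before.length → (',' ∈ before.take j ↔ ',' ∈ sl.take j) := by
    intro j hj
    rw [hbm, ← List.map_take, pv_mem_comma_map, List.take_take]
    have : min j pos.toNat = j := by
      rw [hbm] at hj; simp at hj; omega
    rw [this]
  rw [PySem.Str.rfind_eq, PySem.Str.find_eq, PySem.Str.isIn_eq, PySem.Str.isIn_eq,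
    PySem.Str.toList_slice, PySem.Str.toList_slice]
  simp only [PySem.Chars.slice_eq_listSlice, ← hb, ← hsl]
  have hctl : (",".toList) = [','] := rfl
  set i := PySem.Chars.rfind before m.toList with hi
  set c := PySem.Chars.find before (",".toList) with hc
  constructor
  · rintro ⟨h1, h2, h3⟩
    obtain ⟨hi0, hilen, hipre⟩ := pv_rfind_mem h1
    -- A's comma test, moved to the lowered prefix
    rw [PySem.List.slice_to _ hi0] at h2
    have h2' : ',' ∈ sl.take i.toNat := by
      have := (PySem.Chars.isIn_iff_infix _ _).mp h2
      exact (List.singleton_infix_iff ',' _).mp this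
    have hmemb : ',' ∈ before.take i.toNat := (hcomma_take i.toNat hilen).mpr h2'
    obtain ⟨k, hki, hkpre⟩ := pv_comma_take_exists hmemb
    -- so the first comma c exists and lies before i
    have hcin : PySem.Chars.isIn [','] before = true := by
      rw [← PySem.Chars.exists_prefix_drop_iff_isIn]
      exact ⟨k, hkpre⟩
    have hc0 : 0 ≤ c := by
      rw [hc]
      exact (PySem.Chars.find_nonneg_iff _ _).mpr ((PySem.Chars.isIn_iff_infix _ _).mp hcin)
    have hcspec := PySem.Chars.find_spec (s := before) (sub := (",".toList)) (by rw [← hc]; exact hc0)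
    rw [← hc] at hcspec
    have hck : c.toNat ≤ k := by
      by_contra hck
      exact hcspec.2 k (by omega) hkpre
    refine ⟨by omega, ?_⟩
    rw [PySem.List.slice_from _ (by omega)]
    rw [← PySem.Chars.exists_prefix_drop_iff_isIn]
    refine ⟨i.toNat - ((c + 1).toNat), ?_⟩
    rw [List.drop_drop]
    have : (c + 1).toNat + (i.toNat - (c + 1).toNat) = i.toNat := by omega
    rw [this]
    exact hipre
  · rintro ⟨h1, h2⟩
    have hc0 : 0 ≤ c := by
      have hge := PySem.Chars.neg_one_le_find (s := before) (sub := (",".toList))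
      rw [← hc] at hge
      omega
    have hcspec := PySem.Chars.find_spec (s := before) (sub := (",".toList)) (by rw [← hc]; exact hc0)
    rw [← hc] at hcspec
    rw [PySem.List.slice_from _ (by omega)] at h2
    obtain ⟨d, hdpre⟩ := (PySem.Chars.exists_prefix_drop_iff_isIn _ _).mpr h2
    rw [List.drop_drop] at hdpre
    obtain ⟨hne, hji⟩ := pv_rfind_ge hm hdpre
    rw [← hi] at hne hji
    obtain ⟨hi0, hilen, hipre⟩ := pv_rfind_mem hne
    have hji' : (c + 1).toNat + d ≤ i.toNat := by omega
    have hci : c.toNat < i.toNat := by omega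
    have hsmall : i.toNat < before.length := by
      have hlen := hipre.length_le
      simp only [List.length_drop] at hlen
      have hm1 : 1 ≤ m.toList.length := List.length_pos_iff.mpr hm
      omega
    refine ⟨hne, ?_, ?_⟩
    · rw [PySem.List.slice_to _ hi0]
      apply (PySem.Chars.isIn_iff_infix _ _).mpr
      apply (List.singleton_infix_iff ',' _).mpr
      apply (hcomma_take i.toNat (by omega)).mp
      exact pv_comma_mem_take (by simpa using hcspec.1) hci
    · have : i = (i.toNat : Int) := (Int.toNat_of_nonneg hi0).symm
      omega

-- markers are nonempty and the two marker lists coincide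
theorem pv_markers_ne : ∀ m ∈ pvMarkersA, m.toList ≠ [] := by decide

-- ===== VERDICT (by name: the statement is the Claim_ definition above) =====
theorem is_in_subordinate_clause_py_spec : Claim_equal_is_in_subordinate_clause_py := by
  intro sentence pos _
  unfold Spec_is_in_subordinate_clause_py
  simp only [is_in_subordinate_clause_py, is_in_subordinate_clause_py_alt]
  by_cases hp : pos ≤ 0
  · rw [if_pos hp]
    rw [← Bool.not_eq_true, pv_loopA_iff]
    rintro ⟨m, hmem, h1, h2, h3⟩
    rw [PySem.Str.rfind_eq] at h1 h3
    have := (pv_rfind_mem h1).1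
    omega
  · rw [if_neg hp]
    have hpos : 0 < pos := by omega
    rw [Bool.eq_iff_iff, pv_loopA_iff]
    split_ifs with hcneg
    · simp only [iff_false]
      rintro ⟨m, hmem, hcond⟩
      exact ((pv_marker_iff sentence pos m hpos (pv_markers_ne m hmem)).mp hcond).1 hcneg
    · rw [List.any_eq_true]
      constructor
      · rintro ⟨m, hmem, hcond⟩
        exact ⟨m, hmem,
          ((pv_marker_iff sentence pos m hpos (pv_markers_ne m hmem)).mp hcond).2⟩
      · rintro ⟨m, hmem, htail⟩
        exact ⟨m, hmem,
          (pv_marker_iff sentence pos m hpos (pv_markers_ne m hmem)).mpr ⟨hcneg, htail⟩⟩
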